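-- pv_equiv track=rewrite | github.com/MrBrantCode/unitest_baseline | mut_generate/mist_train_taco/taco_18385/solution.py | is_special_palindrome
-- ===== SOURCE A (Python) =====
-- def is_special_palindrome(input_string: str) -> str:
--     s = ['23', '10', '30', '11', '13', '12', '31', '33', '32', '21']
--     ans = ''
--
--     for x in input_string:
--         ans += s[ord(x) - 48]
--
--     if ans == ans[::-1]:
--         return 'Yes'
--     else:
--         return 'No'
-- ===== SOURCE B (Python) =====
-- def is_special_palindrome(input_string: str) -> str:
--     s = ['23', '10', '30', '11', '13', '12', '31', '33', '32', '21']
--     codes = [s[ord(x) - 48] for x in input_string]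
--     n = len(codes)
--     for i in range((n + 1) // 2):
--         if codes[i] != codes[n - 1 - i][::-1]:
--             return 'No'
--     return 'Yes'
-- ===== Notes on version B (the rewrite author's own statement) =====
-- stated objective: alternative
-- what changed: B keeps the per-digit 2-char codes as a list and runs a half-length two-pointer mirror comparison (codes[i] vs reversed codes[n-1-i]) with early exit, instead of concatenating all codes into one string and comparing it with its full reverse.
import Mathlib
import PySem

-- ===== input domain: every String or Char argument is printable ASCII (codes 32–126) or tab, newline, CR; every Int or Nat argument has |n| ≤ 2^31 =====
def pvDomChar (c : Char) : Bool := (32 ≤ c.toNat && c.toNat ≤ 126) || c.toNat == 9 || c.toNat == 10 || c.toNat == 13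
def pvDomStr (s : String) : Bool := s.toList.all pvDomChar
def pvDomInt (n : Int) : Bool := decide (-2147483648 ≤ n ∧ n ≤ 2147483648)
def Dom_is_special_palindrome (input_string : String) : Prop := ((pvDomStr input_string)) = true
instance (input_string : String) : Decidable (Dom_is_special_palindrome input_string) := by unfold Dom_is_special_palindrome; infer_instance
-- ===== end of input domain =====

-- B is an alternative: it keeps the per-digit 2-char codes as a list and runs a two-pointer
-- mirror check with early exit instead of concatenating everything and reversing the string.

-- the code table (strings represented as List Char throughout)
def pvTable : List (List Char) :=
  [['2','3'], ['1','0'], ['3','0'], ['1','1'], ['1','3'],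
   ['1','2'], ['3','1'], ['3','3'], ['3','2'], ['2','1']]

-- ===== PORT A =====
-- ans += s[ord(x)-48]  (pyGet? = Python indexing incl. negative wrap; none = IndexError,
-- excluded by Pre_, .getD [] is unreachable inside Pre_);  ans == ans[::-1] compared on code points
def is_special_palindrome (input_string : String) : String :=
  let ans : List Char :=
    input_string.toList.foldl
      (fun acc x => acc ++ ((PySem.List.pyGet? pvTable ((x.toNat : Int) - 48)).getD [])) []
  if ans = ans.reverse then "Yes" else "No"

-- ===== PORT B =====
-- loop 'for i in range((n+1)//2): if codes[i] != codes[n-1-i][::-1]: return "No"'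
def pvCheckB (codes : List (List Char)) (n i : Nat) : String :=
  if _h : i < (n + 1) / 2 then
    if codes.getD i [] ≠ (codes.getD (n - 1 - i) []).reverse then "No"
    else pvCheckB codes n (i + 1)
  else "Yes"
termination_by (n + 1) / 2 - i

def is_special_palindrome_alt (input_string : String) : String :=
  let codes : List (List Char) :=
    input_string.toList.map
      (fun x => (PySem.List.pyGet? pvTable ((x.toNat : Int) - 48)).getD [])
  pvCheckB codes codes.length 0

-- ===== PRECONDITION & SPEC =====
-- Pre_ excludes exactly the inputs on which A raises IndexError: a character with
-- code point < 38 or > 57 makes ord(x)-48 fall outside Python's (wrap-around) index range.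
def Pre_is_special_palindrome (input_string : String) : Prop :=
  input_string.toList.all (fun c => 38 ≤ c.toNat && c.toNat ≤ 57) = true

instance (input_string : String) : Decidable (Pre_is_special_palindrome input_string) := by
  unfold Pre_is_special_palindrome; infer_instance

def pvWitness_is_special_palindrome : String := "130"

def Spec_is_special_palindrome (input_string : String) (out : String) : Prop := out = is_special_palindrome_alt input_string
instance (input_string : String) (out : String) : Decidable (Spec_is_special_palindrome input_string out) := by unfold Spec_is_special_palindrome; infer_instance

-- ===== CLAIM (what is proved, stated in full; the proofs are below) =====
def Claim_equal_is_special_palindrome : Prop := ∀ (input_string : String), Dom_is_special_palindrome input_string → Pre_is_special_palindrome input_string → Spec_is_special_palindrome input_string (is_special_palindrome input_string)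

-- ===== LEMMAS AND PROOFS =====

-- the per-character code map both ports use
def pvCode (c : Char) : List Char :=
  (PySem.List.pyGet? pvTable ((c.toNat : Int) - 48)).getD []

lemma pvCode_len (c : Char) (h1 : 38 ≤ c.toNat) (h2 : c.toNat ≤ 57) :
    (pvCode c).length = 2 := by
  unfold pvCode
  set k := c.toNat with hk
  clear_value k
  interval_cases k <;> decide

-- flatten is injective on lists of blocks of length 2
lemma pvFlatten_inj (l₁ : List (List Char)) : ∀ l₂ : List (List Char),
    (∀ a ∈ l₁, a.length = 2) → (∀ a ∈ l₂, a.length = 2) →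
    l₁.flatten = l₂.flatten → l₁ = l₂ := by
  induction l₁ with
  | nil =>
    intro l₂ _ h₂ h
    cases l₂ with
    | nil => rfl
    | cons b bs =>
      exfalso
      have hb := h₂ b (by simp)
      rcases b with _ | ⟨x, _ | ⟨y, _ | _⟩⟩ <;> simp_all
  | cons a as ih =>
    intro l₂ h₁ h₂ h
    cases l₂ with
    | nil =>
      exfalso
      have ha := h₁ a (by simp)
      rcases a with _ | ⟨x, _ | ⟨y, _ | _⟩⟩ <;> simp_all
    | cons b bs =>
      obtain ⟨x, y, rfl⟩ := List.length_eq_two.mp (h₁ a (by simp))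
      obtain ⟨x', y', rfl⟩ := List.length_eq_two.mp (h₂ b (by simp))
      simp only [List.flatten_cons, List.cons_append, List.nil_append,
        List.cons.injEq] at h
      obtain ⟨rfl, rfl, hf⟩ := h
      rw [ih bs (fun a ha => h₁ a (by simp [ha])) (fun a ha => h₂ a (by simp [ha])) hf]

-- the mirror predicate
def pvP (L : List (List Char)) (i : Nat) : Prop :=
  L.getD i [] = (L.getD (L.length - 1 - i) []).reverse

lemma pvGetD_eq (L : List (List Char)) (i : Nat) (h : i < L.length) :
    L.getD i [] = L[i] := by
  simp [List.getD_eq_getElem?_getD, List.getElem?_eq_getElem h]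

-- L equals its blockwise mirror iff pvP holds below the length
lemma pvMirrorElem (L : List (List Char)) (i : Nat) (hi : i < L.length) :
    (L.reverse.map List.reverse)[i]'(by simpa using hi)
      = (L[L.length - 1 - i]'(by omega)).reverse := by
  simp [List.getElem_reverse]

lemma pvMirror_iff (L : List (List Char)) :
    L = L.reverse.map List.reverse ↔ ∀ i < L.length, pvP L i := by
  constructor
  · intro h i hi
    unfold pvP
    rw [pvGetD_eq L i hi, pvGetD_eq L _ (by omega)]
    calc L[i] = (L.reverse.map List.reverse)[i]'(by simpa using hi) := by
                exact List.getElem_of_eq h hi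
      _ = (L[L.length - 1 - i]'(by omega)).reverse := pvMirrorElem L i hi
  · intro h
    apply List.ext_getElem (by simp)
    intro i hi _
    have hp := h i hi
    unfold pvP at hp
    rw [pvGetD_eq L i hi, pvGetD_eq L _ (by omega)] at hp
    rw [pvMirrorElem L i hi]
    exact hp

-- pvP is symmetric across the middle
lemma pvP_symm (L : List (List Char)) (i : Nat) (hi : i < L.length)
    (h : pvP L (L.length - 1 - i)) : pvP L i := by
  unfold pvP at *
  have : L.length - 1 - (L.length - 1 - i) = i := by omega
  rw [this] at h
  rw [h, List.reverse_reverse]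

-- characterization of B's loop
lemma pvCheckB_yes_iff (L : List (List Char)) (n i : Nat) :
    pvCheckB L n i = "Yes" ↔ ∀ j, i ≤ j → j < (n + 1) / 2 →
      L.getD j [] = (L.getD (n - 1 - j) []).reverse := by
  by_cases h : i < (n + 1) / 2
  · rw [pvCheckB, dif_pos h]
    by_cases hc : L.getD i [] = (L.getD (n - 1 - i) []).reverse
    · rw [if_neg (by simpa using hc)]
      rw [pvCheckB_yes_iff]
      constructor
      · intro hall j hij hj
        rcases Nat.eq_or_lt_of_le hij with rfl | hlt
        · exact hc
        · exact hall j hlt hj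
      · intro hall j hij hj
        exact hall j (by omega) hj
    · rw [if_pos (by simpa using hc)]
      constructor
      · intro h'; exact absurd h' (by decide)
      · intro hall; exact absurd (hall i le_rfl h) hc
  · rw [pvCheckB, dif_neg h]
    constructor
    · intro _ j hij hj
      omega
    · intro _; rfl
termination_by (n + 1) / 2 - i

lemma pvCheckB_cases (L : List (List Char)) (n i : Nat) :
    pvCheckB L n i = "Yes" ∨ pvCheckB L n i = "No" := by
  rw [pvCheckB]
  split_ifs with h1 h2
  · right; rfl
  · exact pvCheckB_cases L n (i + 1)
  · left; rfl
termination_by (n + 1) / 2 - i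

-- the half-range check implies the full mirror property
lemma pvHalf_full (L : List (List Char))
    (h : ∀ j < (L.length + 1) / 2, pvP L j) : ∀ i < L.length, pvP L i := by
  intro i hi
  by_cases hhalf : i < (L.length + 1) / 2
  · exact h i hhalf
  · exact pvP_symm L i hi (h (L.length - 1 - i) (by omega))

-- ===== VERDICT (by name: the statement is the Claim_ definition above) =====
theorem is_special_palindrome_spec : Claim_equal_is_special_palindrome := by
  intro input_string _hdom hpre
  unfold Spec_is_special_palindrome is_special_palindrome is_special_palindrome_alt
  set L : List (List Char) := input_string.toList.map pvCode with hL
  have hcodes : input_string.toList.map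
      (fun x => (PySem.List.pyGet? pvTable ((x.toNat : Int) - 48)).getD []) = L := rfl
  have hans : input_string.toList.foldl
      (fun acc x => acc ++ ((PySem.List.pyGet? pvTable ((x.toNat : Int) - 48)).getD [])) []
      = L.flatten := by
    rw [PySem.List.foldl_append_eq_flatMap, List.flatMap_def, hcodes, List.nil_append]
  rw [hans, hcodes]
  have hlen2 : ∀ a ∈ L, a.length = 2 := by
    intro a ha
    rw [hL] at ha
    obtain ⟨c, hc, rfl⟩ := List.mem_map.mp ha
    have hc' := List.all_eq_true.mp hpre c hc
    simp only [Bool.and_eq_true, decide_eq_true_eq] at hc'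
    exact pvCode_len c hc'.1 hc'.2
  have key : (L.flatten = L.flatten.reverse) ↔ (∀ i < L.length, pvP L i) := by
    rw [List.reverse_flatten, ← List.map_reverse, ← pvMirror_iff]
    constructor
    · intro h
      exact pvFlatten_inj L _ hlen2
        (by intro a ha
            obtain ⟨b, hb, rfl⟩ := List.mem_map.mp ha
            simp [hlen2 b (List.mem_reverse.mp hb)]) h
    · intro h; conv_lhs => rw [h]
  by_cases hpal : L.flatten = L.flatten.reverse
  · rw [if_pos hpal]
    symm
    rw [pvCheckB_yes_iff]
    intro j _ hj
    exact (key.mp hpal) j (by omega)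
  · rw [if_neg hpal]
    rcases pvCheckB_cases L L.length 0 with hy | hn
    · exfalso
      apply hpal
      apply key.mpr
      apply pvHalf_full
      intro j hj
      exact (pvCheckB_yes_iff L L.length 0).mp hy j (Nat.zero_le j) hj
    · rw [hn]
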